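-- pv_equiv track=rewrite | github.com/sethmoudry/prism-math | src/prism/techniques/advanced_techniques/functional_equations_cyclic.py | _count_3cycles
-- ===== SOURCE A (Python) =====
-- def _count_3cycles(n):
--     from math import comb, factorial
--     total = 0
--     for k in range(n // 3 + 1):
--         fixed = n - 3 * k
--         ways_to_choose = comb(n, 3 * k)
--         if k == 0:
--             ways_to_partition = 1
--         else:
--             ways_to_partition = factorial(3 * k) // ((3 ** k) * factorial(k))
--         total += ways_to_choose * ways_to_partition
--     return total
-- ===== SOURCE B (Python) =====
-- def _count_3cycles(n):
--     # Linear recurrence a(m) = a(m-1) + (m-1)*(m-2)*a(m-3), a(0)=a(1)=a(2)=1.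
--     if n < 0:
--         return 0
--     a, b, c = 1, 1, 1  # a(m-3), a(m-2), a(m-1) for m = 3
--     for m in range(3, n + 1):
--         a, b, c = b, c, c + (m - 1) * (m - 2) * a
--     return c
-- ===== Notes on version B (the rewrite author's own statement) =====
-- stated objective: faster
-- what changed: Replaced the sum over k of C(n,3k)*(3k)!/(3^k k!) (with per-term binomials, factorials and a bigint division) by the linear three-term recurrence a(m)=a(m-1)+(m-1)(m-2)a(m-3) computed in one pass with a sliding window of three values.
import Mathlib
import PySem

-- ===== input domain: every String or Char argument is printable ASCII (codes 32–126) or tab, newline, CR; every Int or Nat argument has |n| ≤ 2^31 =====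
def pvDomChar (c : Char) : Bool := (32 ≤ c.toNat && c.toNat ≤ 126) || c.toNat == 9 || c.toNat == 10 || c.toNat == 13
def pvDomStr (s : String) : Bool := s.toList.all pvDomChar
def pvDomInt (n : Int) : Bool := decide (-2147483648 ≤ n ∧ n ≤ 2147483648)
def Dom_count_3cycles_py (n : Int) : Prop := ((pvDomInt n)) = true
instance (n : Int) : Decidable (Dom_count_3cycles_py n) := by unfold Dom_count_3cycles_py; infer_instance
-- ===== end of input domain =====

-- B replaces A's per-term binomial/factorial sum by the linear recurrence
-- a(m) = a(m-1) + (m-1)(m-2)a(m-3) computed in a single pass (objective: faster).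

-- ===== PORT A =====
-- math.comb / math.factorial; exact on the nonnegative arguments A ever passes them
-- (inside A's loop n ≥ 0 and 0 ≤ 3k ≤ n, so no ValueError is reachable).
def pyComb (n k : Int) : Int := (Nat.choose n.toNat k.toNat : Int)
def pyFactorial (n : Int) : Int := (n.toNat.factorial : Int)

-- literal transliteration of A: loop over range(n//3+1) accumulating total
def count_3cycles_py (n : Int) : Int :=
  (PySem.List.pyRange 0 (PySem.Int.floordiv n 3 + 1) 1).foldl
    (fun total k =>
      let _fixed := n - 3 * k   -- computed and unused, as in A
      let ways_to_choose := pyComb n (3 * k)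
      let ways_to_partition :=
        if k = 0 then (1 : Int)
        -- 3 ** k ported as 3 ^ k.toNat: exact since k ≥ 0 inside the loop
        else PySem.Int.floordiv (pyFactorial (3 * k)) (3 ^ k.toNat * pyFactorial k)
      total + ways_to_choose * ways_to_partition) 0

-- ===== PORT B =====
-- literal transliteration of Source B: sliding window (a,b,c) = (a(m-3),a(m-2),a(m-1))
def count_3cycles_py_alt (n : Int) : Int :=
  if n < 0 then 0
  else
    ((PySem.List.pyRange 3 (n + 1) 1).foldl
      (fun (st : Int × Int × Int) m => (st.2.1, st.2.2, st.2.2 + (m - 1) * (m - 2) * st.1))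
      (1, 1, 1)).2.2

-- ===== PRECONDITION & SPEC =====
def Spec_count_3cycles_py (n : Int) (out : Int) : Prop := out = count_3cycles_py_alt n
instance (n : Int) (out : Int) : Decidable (Spec_count_3cycles_py n out) := by unfold Spec_count_3cycles_py; infer_instance

-- ===== CLAIM (what is proved, stated in full; the proofs are below) =====
def Claim_equal_count_3cycles_py : Prop := ∀ (n : Int), Dom_count_3cycles_py n → Spec_count_3cycles_py n (count_3cycles_py n)

-- ===== LEMMAS AND PROOFS =====

-- pvP k = (3k)! / (3^k k!), the number of ways to arrange 3k elements into k 3-cycles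
def pvP : ℕ → ℕ
  | 0 => 1
  | k + 1 => (3 * k + 1) * (3 * k + 2) * pvP k

-- one term of A's sum
def pvT (m k : ℕ) : ℕ := Nat.choose m (3 * k) * pvP k

-- A's sum
def pvS (m : ℕ) : ℕ := ∑ k ∈ Finset.range (m / 3 + 1), pvT m k

-- B's recurrence
def pvR : ℕ → ℕ
  | 0 => 1
  | 1 => 1
  | 2 => 1
  | m + 3 => pvR (m + 2) + (m + 2) * (m + 1) * pvR m

lemma pvP_fact (k : ℕ) : (3 * k).factorial = pvP k * (3 ^ k * k.factorial) := by
  induction k with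
  | zero => decide
  | succ k ih =>
    have h : 3 * (k + 1) = 3 * k + 1 + 1 + 1 := by ring
    rw [h, Nat.factorial_succ, Nat.factorial_succ, Nat.factorial_succ, ih, pvP,
      pow_succ, Nat.factorial_succ]
    ring

lemma pvT_mul (m k : ℕ) (h : 3 * k ≤ m) :
    pvT m k * ((m - 3 * k).factorial * (3 ^ k * k.factorial)) = m.factorial := by
  unfold pvT
  calc Nat.choose m (3 * k) * pvP k * ((m - 3 * k).factorial * (3 ^ k * k.factorial))
      = Nat.choose m (3 * k) * (pvP k * (3 ^ k * k.factorial)) * (m - 3 * k).factorial := by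
        ring
    _ = Nat.choose m (3 * k) * (3 * k).factorial * (m - 3 * k).factorial := by
        rw [← pvP_fact]
    _ = m.factorial := Nat.choose_mul_factorial_mul_factorial h

lemma pvT_zero (m k : ℕ) (h : m < 3 * k) : pvT m k = 0 := by
  unfold pvT
  rw [Nat.choose_eq_zero_of_lt h, zero_mul]

lemma pvT_rec (m k : ℕ) (h : 3 * (k + 1) ≤ m + 3) :
    pvT (m + 3) (k + 1) = pvT (m + 2) (k + 1) + (m + 2) * (m + 1) * pvT m k := by
  have hk : 3 * k ≤ m := by omega
  set D := (m - 3 * k).factorial * (3 ^ (k + 1) * (k + 1).factorial) with hD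
  have hDpos : 0 < D := by positivity
  apply Nat.eq_of_mul_eq_mul_right hDpos
  have hL : pvT (m + 3) (k + 1) * D = (m + 3).factorial := by
    have := pvT_mul (m + 3) (k + 1) h
    rwa [show m + 3 - 3 * (k + 1) = m - 3 * k by omega] at this
  have h1 : pvT (m + 2) (k + 1) * D = (m + 2).factorial * (m - 3 * k) := by
    rcases le_or_gt (3 * (k + 1)) (m + 2) with h2 | h2
    · have hm1 : 1 ≤ m - 3 * k := by omega
      have := pvT_mul (m + 2) (k + 1) h2
      rw [show m + 2 - 3 * (k + 1) = m - 3 * k - 1 by omega] at this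
      obtain ⟨t, ht⟩ : ∃ t, m - 3 * k = t + 1 := ⟨m - 3 * k - 1, by omega⟩
      rw [show m - 3 * k - 1 = t by omega] at this
      calc pvT (m + 2) (k + 1) * D
          = pvT (m + 2) (k + 1) * (t.factorial * (3 ^ (k + 1) * (k + 1).factorial)) * (m - 3 * k) := by
            rw [hD, ht, Nat.factorial_succ]
            ring
        _ = (m + 2).factorial * (m - 3 * k) := by rw [this]
    · have hz : pvT (m + 2) (k + 1) = 0 := pvT_zero _ _ h2
      have hz2 : m - 3 * k = 0 := by omega
      rw [hz, hz2, zero_mul, mul_zero]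
  have h2 : (m + 2) * (m + 1) * pvT m k * D = (m + 2).factorial * (3 * (k + 1)) := by
    have := pvT_mul m k hk
    calc (m + 2) * (m + 1) * pvT m k * D
        = (m + 2) * (m + 1) * (pvT m k * ((m - 3 * k).factorial * (3 ^ k * k.factorial))) * (3 * (k + 1)) := by
          rw [hD, pow_succ, Nat.factorial_succ]; ring
      _ = (m + 2) * (m + 1) * m.factorial * (3 * (k + 1)) := by rw [this]
      _ = (m + 2).factorial * (3 * (k + 1)) := by
          rw [show (m + 2).factorial = (m + 2) * ((m + 1) * m.factorial) by
            rw [Nat.factorial_succ, Nat.factorial_succ]]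
          ring
  rw [hL, add_mul, h1, h2, ← Nat.mul_add,
    show m - 3 * k + 3 * (k + 1) = m + 3 by omega,
    show (m + 3).factorial = (m + 2).factorial * (m + 3) by
      rw [Nat.factorial_succ]; ring]

lemma pvS_ext (m N : ℕ) (h : m / 3 + 1 ≤ N) :
    ∑ k ∈ Finset.range N, pvT m k = pvS m := by
  unfold pvS
  symm
  apply Finset.sum_subset (by intro x hx; simp only [Finset.mem_range] at *; omega)
  intro k _ hk
  simp only [Finset.mem_range, not_lt] at hk
  exact pvT_zero m k (by omega)

lemma pvS_rec (m : ℕ) : pvS (m + 3) = pvS (m + 2) + (m + 2) * (m + 1) * pvS m := by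
  have h3 : (m + 3) / 3 + 1 = (m / 3 + 1) + 1 := by omega
  have step1 : pvS (m + 3) =
      (∑ k ∈ Finset.range (m / 3 + 1), pvT (m + 3) (k + 1)) + pvT (m + 3) 0 := by
    unfold pvS
    rw [h3, Finset.sum_range_succ']
  have hT0 : pvT (m + 3) 0 = 1 := by simp [pvT, pvP]
  have step2 : ∑ k ∈ Finset.range (m / 3 + 1), pvT (m + 3) (k + 1) =
      (∑ k ∈ Finset.range (m / 3 + 1), pvT (m + 2) (k + 1)) +
        (m + 2) * (m + 1) * pvS m := by
    have hterm : ∀ k ∈ Finset.range (m / 3 + 1),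
        pvT (m + 3) (k + 1) = pvT (m + 2) (k + 1) + (m + 2) * (m + 1) * pvT m k := by
      intro k hk
      simp only [Finset.mem_range] at hk
      exact pvT_rec m k (by have := Nat.div_mul_le_self m 3; omega)
    rw [Finset.sum_congr rfl hterm, Finset.sum_add_distrib, pvS, ← Finset.mul_sum]
  have step3 : (∑ k ∈ Finset.range (m / 3 + 1), pvT (m + 2) (k + 1)) + pvT (m + 2) 0 =
      pvS (m + 2) := by
    rw [← Finset.sum_range_succ']
    exact pvS_ext (m + 2) (m / 3 + 2) (by omega)
  have hT0' : pvT (m + 2) 0 = 1 := by simp [pvT, pvP]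
  calc pvS (m + 3)
      = (∑ k ∈ Finset.range (m / 3 + 1), pvT (m + 3) (k + 1)) + 1 := by rw [step1, hT0]
    _ = (∑ k ∈ Finset.range (m / 3 + 1), pvT (m + 2) (k + 1)) + 1 +
        (m + 2) * (m + 1) * pvS m := by rw [step2]; ring
    _ = (∑ k ∈ Finset.range (m / 3 + 1), pvT (m + 2) (k + 1)) + pvT (m + 2) 0 +
        (m + 2) * (m + 1) * pvS m := by rw [hT0']
    _ = pvS (m + 2) + (m + 2) * (m + 1) * pvS m := by rw [step3]

lemma pvS_eq_pvR (m : ℕ) : pvS m = pvR m := by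
  induction m using pvR.induct with
  | case1 => decide
  | case2 => decide
  | case3 => decide
  | case4 m ih2 ih0 => rw [pvS_rec, pvR, ih2, ih0]

-- fold over range(N) that only accumulates additively is the sum of the terms
lemma foldl_pyRange_add (f : Int → Int) (N : ℕ) (init : Int) :
    (PySem.List.pyRange 0 (N : Int) 1).foldl (fun t k => t + f k) init =
      init + ∑ k ∈ Finset.range N, f (k : Int) := by
  induction N generalizing init with
  | zero =>
    rw [PySem.List.pyRange_one_eq_nil (by simp)]
    simp
  | succ N ih =>
    rw [show ((N + 1 : ℕ) : Int) = (N : Int) + 1 by push_cast; ring,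
      PySem.List.pyRange_one_succ_right (by positivity),
      List.foldl_append, ih, Finset.sum_range_succ]
    simp
    ring

-- each term of A's loop equals the cast of pvT
lemma term_eq (nn k : ℕ) :
    pyComb (nn : Int) (3 * (k : Int)) *
      (if (k : Int) = 0 then (1 : Int)
       else PySem.Int.floordiv (pyFactorial (3 * (k : Int)))
         (3 ^ ((k : Int)).toNat * pyFactorial (k : Int))) = (pvT nn k : Int) := by
  cases k with
  | zero => simp [pyComb, pvT, pvP]
  | succ j =>
    rw [if_neg (by exact_mod_cast Nat.succ_ne_zero j)]
    have e1 : (((j + 1 : ℕ) : Int)).toNat = j + 1 := by omega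
    have e2 : ((3 : Int) * ((j + 1 : ℕ) : Int)).toNat = 3 * (j + 1) := by omega
    have hc : pyComb (nn : Int) (3 * (((j : ℕ) + 1 : ℕ) : Int)) =
        (Nat.choose nn (3 * (j + 1)) : Int) := by
      unfold pyComb
      rw [Int.toNat_natCast, e2]
    have hf1 : pyFactorial (3 * (((j : ℕ) + 1 : ℕ) : Int)) = ((3 * (j + 1)).factorial : Int) := by
      unfold pyFactorial
      rw [e2]
    have hf2 : (3 : Int) ^ ((((j : ℕ) + 1 : ℕ) : Int)).toNat * pyFactorial (((j : ℕ) + 1 : ℕ) : Int) =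
        ((3 ^ (j + 1) * (j + 1).factorial : ℕ) : Int) := by
      unfold pyFactorial
      rw [e1]
      push_cast
      ring
    rw [hc, hf1, hf2]
    have hdiv : (3 * (j + 1)).factorial / (3 ^ (j + 1) * (j + 1).factorial) = pvP (j + 1) := by
      rw [pvP_fact (j + 1)]
      exact Nat.mul_div_cancel _ (by positivity)
    rw [show PySem.Int.floordiv ((3 * (j + 1)).factorial : Int)
          ((3 ^ (j + 1) * (j + 1).factorial : ℕ) : Int) =
          (((3 * (j + 1)).factorial / (3 ^ (j + 1) * (j + 1).factorial) : ℕ) : Int) from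
        PySem.Int.floordiv_natCast _ _, hdiv]
    unfold pvT
    push_cast
    ring

-- A's port on a nonnegative input computes pvS
lemma A_eq (nn : ℕ) : count_3cycles_py (nn : Int) = (pvS nn : Int) := by
  unfold count_3cycles_py
  have hfd : PySem.Int.floordiv (nn : Int) 3 + 1 = ((nn / 3 + 1 : ℕ) : Int) := by
    rw [show (3 : Int) = ((3 : ℕ) : Int) by simp, PySem.Int.floordiv_natCast]
    push_cast
    ring
  rw [hfd]
  have h := foldl_pyRange_add
    (fun k => pyComb (nn : Int) (3 * k) *
      (if k = 0 then (1 : Int)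
       else PySem.Int.floordiv (pyFactorial (3 * k)) (3 ^ k.toNat * pyFactorial k)))
    (nn / 3 + 1) 0
  rw [show ((PySem.List.pyRange 0 ((nn / 3 + 1 : ℕ) : Int) 1).foldl
      (fun total k =>
        let _fixed := (nn : Int) - 3 * k
        let ways_to_choose := pyComb (nn : Int) (3 * k)
        let ways_to_partition :=
          if k = 0 then (1 : Int)
          else PySem.Int.floordiv (pyFactorial (3 * k)) (3 ^ k.toNat * pyFactorial k)
        total + ways_to_choose * ways_to_partition) 0) =
      0 + ∑ k ∈ Finset.range (nn / 3 + 1),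
        (pyComb (nn : Int) (3 * (k : Int)) *
          (if (k : Int) = 0 then (1 : Int)
           else PySem.Int.floordiv (pyFactorial (3 * (k : Int)))
             (3 ^ ((k : Int)).toNat * pyFactorial (k : Int)))) from h]
  rw [zero_add, pvS]
  push_cast
  apply Finset.sum_congr rfl
  intro k _
  exact_mod_cast term_eq nn k

-- A's port on a negative input: the range is empty, total = 0
lemma A_neg (n : Int) (h : n < 0) : count_3cycles_py n = 0 := by
  unfold count_3cycles_py
  have hlt : PySem.Int.floordiv n 3 < 0 := by
    rw [PySem.Int.floordiv_lt_iff_lt_mul (by norm_num)]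
    omega
  rw [PySem.List.pyRange_one_eq_nil (by omega)]
  rfl

-- loop invariant of B: after processing range(3, 3+j) the window is (pvR j, pvR (j+1), pvR (j+2))
lemma B_inv (j : ℕ) :
    (PySem.List.pyRange 3 (3 + (j : Int)) 1).foldl
      (fun (st : Int × Int × Int) m => (st.2.1, st.2.2, st.2.2 + (m - 1) * (m - 2) * st.1))
      (1, 1, 1) = ((pvR j : Int), (pvR (j + 1) : Int), (pvR (j + 2) : Int)) := by
  induction j with
  | zero =>
    rw [show (3 : Int) + ((0 : ℕ) : Int) = 3 by simp, PySem.List.pyRange_one_eq_nil (by norm_num)]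
    simp [pvR]
  | succ j ih =>
    rw [show (3 : Int) + ((j + 1 : ℕ) : Int) = (3 + (j : Int)) + 1 by push_cast; ring,
      PySem.List.pyRange_one_succ_right (by omega), List.foldl_append, ih]
    simp only [List.foldl_cons, List.foldl_nil]
    refine Prod.ext rfl (Prod.ext rfl ?_)
    simp only []
    rw [show j + 1 + 2 = j + 3 by ring, pvR]
    push_cast
    ring

-- B's port on a nonnegative input computes pvR
lemma B_eq (nn : ℕ) : count_3cycles_py_alt (nn : Int) = (pvR nn : Int) := by
  unfold count_3cycles_py_alt
  rw [if_neg (by omega)]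
  rcases le_or_gt 2 nn with h | h
  · have hr : ((nn : ℕ) : Int) + 1 = 3 + ((nn - 2 : ℕ) : Int) := by
      have : ((nn - 2 : ℕ) : Int) = (nn : Int) - 2 := by omega
      omega
    rw [hr, B_inv (nn - 2), show nn - 2 + 2 = nn by omega]
  · interval_cases nn
    · rw [PySem.List.pyRange_one_eq_nil (by norm_num)]; rfl
    · rw [PySem.List.pyRange_one_eq_nil (by norm_num)]; rfl

-- ===== VERDICT (by name: the statement is the Claim_ definition above) =====
theorem count_3cycles_py_spec : Claim_equal_count_3cycles_py := by
  intro n _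
  unfold Spec_count_3cycles_py
  rcases lt_or_ge n 0 with h | h
  · rw [A_neg n h]
    unfold count_3cycles_py_alt
    rw [if_pos h]
  · lift n to ℕ using h with nn
    rw [A_eq nn, B_eq nn, pvS_eq_pvR]
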